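-- pv_equiv track=rewrite | github.com/DeerDen/Data-Structures-and-Algorithms | Python/PriorityQueues/MinPriorityQueue.py | getLayerOfElement
-- ===== SOURCE A (Python) =====
-- def getLayerOfElement(n):
--     counter = 1
--     currentLayer = 0
--     while(True):
--         if(counter >= n):
--             return currentLayer
--         currentLayer += 1
--         counter = counter*2
-- ===== SOURCE B (Python) =====
-- def getLayerOfElement(n):
--     if n <= 1:
--         return 0
--     return (n - 1).bit_length()
-- ===== Notes on version B (the rewrite author's own statement) =====
-- stated objective: simpler
-- what changed: Replaced the counter-doubling while loop with a closed-form expression: for arguments at most one the result is zero, otherwise the bit length of the predecessor, which equals the loop's ceiling of log base two.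
import Mathlib
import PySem

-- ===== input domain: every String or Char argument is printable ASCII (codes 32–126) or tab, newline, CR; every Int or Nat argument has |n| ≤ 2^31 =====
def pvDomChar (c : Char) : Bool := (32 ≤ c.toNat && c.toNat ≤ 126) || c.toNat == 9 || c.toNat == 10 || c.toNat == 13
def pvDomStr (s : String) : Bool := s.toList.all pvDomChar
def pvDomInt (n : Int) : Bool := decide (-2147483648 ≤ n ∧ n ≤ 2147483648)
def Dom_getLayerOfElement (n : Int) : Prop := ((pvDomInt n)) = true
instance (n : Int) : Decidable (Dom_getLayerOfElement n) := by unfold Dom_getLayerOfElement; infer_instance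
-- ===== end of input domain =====

-- B replaces A's counter-doubling while loop with a closed-form bit-length expression (objective: simpler, no loop).


-- ===== PORT A =====
-- A's while(True) loop: state (counter, currentLayer); counter starts at 1 and doubles,
-- so we carry the invariant 1 ≤ counter as a Prop argument to justify termination.
def getLayerOfElementLoop (n : Int) (counter : Int) (currentLayer : Int) (h : 1 ≤ counter) : Int :=
  if counter ≥ n then currentLayer
  else getLayerOfElementLoop n (counter * 2) (currentLayer + 1) (by omega)
termination_by (n - counter).toNat
decreasing_by omega

def getLayerOfElement (n : Int) : Int :=
  getLayerOfElementLoop n 1 0 (by omega)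

-- ===== PORT B =====
-- (n-1).bit_length() for n ≥ 2, i.e. (n-1).toNat ≥ 1: bit_length m = Nat.log 2 m + 1 for m ≥ 1.
def getLayerOfElement_alt (n : Int) : Int :=
  if n ≤ 1 then 0
  else ((Nat.log 2 (n - 1).toNat : Nat) : Int) + 1

-- ===== PRECONDITION & SPEC =====
def Spec_getLayerOfElement (n : Int) (out : Int) : Prop := out = getLayerOfElement_alt n
instance (n : Int) (out : Int) : Decidable (Spec_getLayerOfElement n out) := by unfold Spec_getLayerOfElement; infer_instance

-- ===== CLAIM (what is proved, stated in full; the proofs are below) =====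
def Claim_equal_getLayerOfElement : Prop := ∀ (n : Int), Dom_getLayerOfElement n → Spec_getLayerOfElement n (getLayerOfElement n)

-- ===== LEMMAS AND PROOFS =====

theorem loop_done (n counter currentLayer : Int) (h : 1 ≤ counter) (hge : counter ≥ n) :
    getLayerOfElementLoop n counter currentLayer h = currentLayer := by
  unfold getLayerOfElementLoop; simp [hge]

theorem loop_step (n counter currentLayer : Int) (h : 1 ≤ counter) (hlt : ¬ counter ≥ n) :
    getLayerOfElementLoop n counter currentLayer h
      = getLayerOfElementLoop n (counter * 2) (currentLayer + 1) (by omega) := by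
  conv_lhs => rw [getLayerOfElementLoop]
  simp [hlt]

theorem pow2_one_le (j : Nat) : (1:Int) ≤ 2^j := one_le_pow₀ (by norm_num)

-- Invariant (fuel k bounds the remaining doublings): starting from counter = 2^j,
-- layer = j, with 2^j < n ≤ 2^j * 2^k, the loop returns Nat.log 2 (n-1).toNat + 1.
theorem loop_invariant (n : Int) (hn : 2 ≤ n) :
    ∀ (k j : Nat), (2:Int)^j < n → n ≤ (2:Int)^j * 2^k →
      getLayerOfElementLoop n ((2:Int)^j) (j : Int) (pow2_one_le j)
        = ((Nat.log 2 (n - 1).toNat : Nat) : Int) + 1 := by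
  have hm1 : 1 ≤ (n - 1).toNat := by omega
  intro k
  induction k with
  | zero =>
    intro j hj hub
    simp at hub; omega
  | succ k ih =>
    intro j hj hub
    have hpowle : 2^j ≤ (n - 1).toNat := by
      have : (2:Int)^j ≤ n - 1 := by omega
      have h2 : ((2:Nat)^j : Int) ≤ ((n-1).toNat : Int) := by push_cast; omega
      exact_mod_cast h2
    rw [loop_step n _ _ _ (by omega)]
    by_cases hstop : (2:Int)^j * 2 ≥ n
    · -- loop stops at layer j+1; show log = j
      have hlt2 : (n - 1).toNat < 2^(j+1) := by
        have h1 : n - 1 < (2:Int)^(j+1) := by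
          have : (2:Int)^(j+1) = (2:Int)^j * 2 := by ring
          omega
        have h2 : ((n-1).toNat : Int) < ((2:Nat)^(j+1) : Int) := by push_cast; omega
        exact_mod_cast h2
      have hlog : Nat.log 2 (n - 1).toNat = j :=
        Nat.log_eq_of_pow_le_of_lt_pow hpowle hlt2
      rw [loop_done n _ _ _ hstop, hlog]
    · -- recurse: counter*2 = 2^(j+1)
      have hj1 : (2:Int)^(j+1) < n := by
        have : (2:Int)^(j+1) = (2:Int)^j * 2 := by ring
        omega
      have hub1 : n ≤ (2:Int)^(j+1) * 2^k := by
        have : (2:Int)^(j+1) * 2^k = (2:Int)^j * 2^(k+1) := by ring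
        omega
      have hrec := ih (j+1) hj1 hub1
      have hcast : ((j:Int) + 1) = ((j+1 : Nat) : Int) := by push_cast; try ring
      rw [hcast]
      have harg : getLayerOfElementLoop n ((2:Int)^j * 2) ((j+1 : Nat) : Int) (by have := pow2_one_le j; omega)
          = getLayerOfElementLoop n ((2:Int)^(j+1)) ((j+1 : Nat) : Int) (pow2_one_le (j+1)) := by
        congr 1; try ring
      rw [harg, hrec]

-- ===== VERDICT (by name: the statement is the Claim_ definition above) =====
theorem getLayerOfElement_spec : Claim_equal_getLayerOfElement := by
  intro n hdom
  unfold Dom_getLayerOfElement pvDomInt at hdom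
  rw [decide_eq_true_iff] at hdom
  unfold Spec_getLayerOfElement getLayerOfElement getLayerOfElement_alt
  by_cases hle : n ≤ 1
  · rw [loop_done n 1 0 (by omega) (by omega)]
    simp [hle]
  · have hn : 2 ≤ n := by omega
    have hub : n ≤ (2:Int)^(0:Nat) * 2^(31:Nat) := by norm_num; omega
    have h1 : (2:Int)^(0:Nat) < n := by norm_num; omega
    have hrec := loop_invariant n hn 31 0 h1 hub
    simp only [Nat.cast_zero] at hrec
    have harg : getLayerOfElementLoop n 1 0 (by omega)
        = getLayerOfElementLoop n ((2:Int)^(0:Nat)) 0 (pow2_one_le 0) := by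
      congr 1; try norm_num
    rw [harg, hrec]
    simp [hle]
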